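-- pv_equiv track=rewrite | github.com/VicKnyazeva/python_basic_programmer | 4/hw4_4.py | degree_string
-- ===== SOURCE A (Python) =====
-- superscript_numbers = ['⁰', '¹', '²', '³', '⁴', '⁵', '⁶', '⁷', '⁸', '⁹']
--
-- def degree_string(degree):
--     match degree:
--         case 0:
--             return superscript_numbers[0]
--         case 1:
--             return ''
--         case _:
--             result = ''
--             while degree > 0:
--                 digit = degree % 10
--                 degree //= 10
--                 result = superscript_numbers[digit] + result
--
--     return result
-- ===== SOURCE B (Python) =====
-- superscript_numbers = ['⁰', '¹', '²', '³', '⁴', '⁵', '⁶', '⁷', '⁸', '⁹']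
--
-- def degree_string(degree):
--     if degree == 0:
--         return superscript_numbers[0]
--     if degree <= 1:
--         return ''
--     return ''.join(superscript_numbers[ord(c) - 48] for c in str(degree))
-- ===== Notes on version B (the rewrite author's own statement) =====
-- stated objective: idiomatic
-- what changed: Replaces the arithmetic digit-extraction loop (repeated floor division and remainder) with a single map over the characters of str(degree), joining the superscript glyph of each decimal digit; explicit guards keep A's empty-string result for exponent one and for negatives.
import Mathlib
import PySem

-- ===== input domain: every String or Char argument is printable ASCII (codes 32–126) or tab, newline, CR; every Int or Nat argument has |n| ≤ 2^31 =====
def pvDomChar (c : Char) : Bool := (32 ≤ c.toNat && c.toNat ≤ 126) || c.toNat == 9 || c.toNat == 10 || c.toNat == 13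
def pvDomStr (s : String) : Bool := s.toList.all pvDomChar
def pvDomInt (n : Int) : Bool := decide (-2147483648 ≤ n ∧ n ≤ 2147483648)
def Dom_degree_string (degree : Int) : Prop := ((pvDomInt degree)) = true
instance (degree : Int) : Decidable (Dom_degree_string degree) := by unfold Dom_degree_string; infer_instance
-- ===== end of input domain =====

-- B replaces A's arithmetic digit-extraction loop by mapping each character of str(degree)
-- to its superscript glyph (objective: idiomatic; same cost).

-- ===== PORT A =====
def superscript_numbers : List String := ["⁰", "¹", "²", "³", "⁴", "⁵", "⁶", "⁷", "⁸", "⁹"]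

-- the while loop of A's default case; the .getD "" is unreachable (0 ≤ digit < 10)
def degreeLoop (degree : Int) (result : String) : String :=
  if degree > 0 then
    degreeLoop (PySem.Int.floordiv degree 10)
      (((PySem.List.pyGet? superscript_numbers (PySem.Int.mod degree 10)).getD "") ++ result)
  else result
termination_by degree.toNat
decreasing_by
  have h : PySem.Int.floordiv degree 10 = degree / 10 :=
    PySem.Int.floordiv_eq_ediv_of_pos (by omega)
  rw [h]; omega

def degree_string (degree : Int) : String :=
  if degree = 0 then (PySem.List.pyGet? superscript_numbers 0).getD ""
  else if degree = 1 then ""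
  else degreeLoop degree ""

-- ===== PORT B =====
-- the body of B's generator expression: superscript_numbers[ord(c) - 48]
def supOf (c : Char) : String :=
  (PySem.List.pyGet? superscript_numbers ((c.toNat : Int) - 48)).getD ""

def degree_string_alt (degree : Int) : String :=
  if degree = 0 then (PySem.List.pyGet? superscript_numbers 0).getD ""
  else if degree ≤ 1 then ""
  else PySem.Str.join "" ((PySem.Int.toStr degree).toList.map supOf)

-- ===== PRECONDITION & SPEC =====
def Spec_degree_string (degree : Int) (out : String) : Prop := out = degree_string_alt degree
instance (degree : Int) (out : String) : Decidable (Spec_degree_string degree out) := by unfold Spec_degree_string; infer_instance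

-- ===== CLAIM (what is proved, stated in full; the proofs are below) =====
def Claim_equal_degree_string : Prop := ∀ (degree : Int), Dom_degree_string degree → Spec_degree_string degree (degree_string degree)

-- ===== LEMMAS AND PROOFS =====

-- the superscript glyph of digit d
def supS (d : Nat) : String := (PySem.List.pyGet? superscript_numbers (d : Int)).getD ""

-- what A's loop builds for a nonnegative argument
def S : Nat → String := fun n =>
  if n = 0 then "" else S (n / 10) ++ supS (n % 10)
decreasing_by exact Nat.div_lt_self (by omega) (by omega)

lemma empty_append (s : String) : "" ++ s = s := by
  apply String.ext; simp

lemma append_empty (s : String) : s ++ "" = s := by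
  apply String.ext; simp

lemma loopA_eq (n : Nat) : ∀ acc : String, degreeLoop (n : Int) acc = S n ++ acc := by
  induction n using Nat.strong_induction_on with
  | _ n ih =>
    intro acc
    rw [degreeLoop, S]
    by_cases h0 : n = 0
    · simp [h0]
    · have hpos : ((n : Int) > 0) := by omega
      rw [if_pos hpos, if_neg h0]
      have hdiv : PySem.Int.floordiv (n : Int) 10 = ((n / 10 : Nat) : Int) := by
        exact_mod_cast PySem.Int.floordiv_natCast n 10
      have hmod : PySem.Int.mod (n : Int) 10 = ((n % 10 : Nat) : Int) := by
        exact_mod_cast PySem.Int.mod_natCast n 10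
      rw [hdiv, hmod]
      rw [ih (n / 10) (Nat.div_lt_self (by omega) (by omega))]
      apply String.ext
      simp [supS, String.toList_append]

-- big-endian decimal digit characters of n, as A/B both ultimately produce them
def tdc : Nat → List Char := fun n =>
  if n < 10 then [Nat.digitChar n] else tdc (n / 10) ++ [Nat.digitChar (n % 10)]
decreasing_by exact Nat.div_lt_self (by omega) (by omega)

lemma tdcore_eq (f : Nat) : ∀ (n : Nat) (acc : List Char), n < f →
    Nat.toDigitsCore 10 f n acc = tdc n ++ acc := by
  induction f with
  | zero => intro n acc h; omega
  | succ f ih =>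
    intro n acc h
    rw [Nat.toDigitsCore, tdc]
    by_cases h10 : n < 10
    · have : n / 10 = 0 := Nat.div_eq_of_lt h10
      simp [this, Nat.mod_eq_of_lt h10, h10]
    · have hne : ¬ n / 10 = 0 := by omega
      rw [if_neg hne, if_neg h10]
      rw [ih (n / 10) _ (by omega)]
      simp

lemma toDigits_eq_tdc (n : Nat) : Nat.toDigits 10 n = tdc n := by
  rw [Nat.toDigits, tdcore_eq (n + 1) n [] (by omega), List.append_nil]

lemma supOf_digitChar (d : Nat) (h : d < 10) : supOf (Nat.digitChar d) = supS d := by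
  interval_cases d <;> rfl

lemma intersperse_nil_flatten (xs : List (List Char)) :
    (List.intersperse [] xs).flatten = xs.flatten := by
  induction xs with
  | nil => rfl
  | cons a t ih =>
    cases t with
    | nil => simp
    | cons b t2 => simp [List.intersperse] at *; simp [ih]

lemma join_snoc (l : List String) (s : String) :
    PySem.Str.join "" (l ++ [s]) = PySem.Str.join "" l ++ s := by
  apply String.ext
  simp [PySem.Str.join, PySem.Chars.join, List.intercalate, intersperse_nil_flatten]

lemma join_tdc (n : Nat) (hn : n ≠ 0) :
    PySem.Str.join "" ((tdc n).map supOf) = S n := by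
  induction n using Nat.strong_induction_on with
  | _ n ih =>
    rw [tdc, S, if_neg hn]
    by_cases h10 : n < 10
    · rw [if_pos h10]
      have : n / 10 = 0 := Nat.div_eq_of_lt h10
      rw [this, S, if_pos rfl, empty_append]
      rw [List.map_singleton, supOf_digitChar n h10, Nat.mod_eq_of_lt h10]
      apply String.ext
      simp [PySem.Str.join, PySem.Chars.join, List.intercalate]
    · rw [if_neg h10, List.map_append, List.map_singleton, join_snoc]
      rw [ih (n / 10) (Nat.div_lt_self (by omega) (by omega)) (by omega)]
      rw [supOf_digitChar (n % 10) (Nat.mod_lt n (by omega))]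

lemma loop_neg (d : Int) (h : ¬ d > 0) : degreeLoop d "" = "" := by
  rw [degreeLoop, if_neg h]

-- ===== VERDICT (by name: the statement is the Claim_ definition above) =====
theorem degree_string_spec : Claim_equal_degree_string := by
  intro degree _
  unfold Spec_degree_string degree_string degree_string_alt
  by_cases h0 : degree = 0
  · simp [h0]
  · rw [if_neg h0, if_neg h0]
    by_cases h1 : degree ≤ 1
    · have hne1 : degree = 1 ∨ degree < 1 := by omega
      rcases hne1 with h | h
      · simp [h]
      · rw [if_neg (by omega), if_pos h1, loop_neg degree (by omega)]
    · rw [if_neg (by omega), if_neg h1]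
      obtain ⟨n, rfl⟩ : ∃ n : Nat, degree = (n : Int) :=
        ⟨degree.toNat, by omega⟩
      rw [loopA_eq n "", append_empty]
      have htl : (PySem.Int.toStr (n : Int)).toList = Nat.toDigits 10 n := by
        rw [PySem.Int.toList_toStr, PySem.Int.toChars, if_neg (by omega)]
        simp
      rw [htl, toDigits_eq_tdc, join_tdc n (by omega)]
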